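-- pv_equiv track=rewrite | github.com/frostry/attackcode | attack-using16.py | get_zeros
-- ===== SOURCE A (Python) =====
-- def get_zeros(coeffs, n):
--     zero_count = 0
--     temp_count = 0
--     for i in range(n):
--         if coeffs[i] == 0:
--             temp_count += 1
--         else:
--             if temp_count > zero_count:
--                 zero_count = temp_count
--             temp_count = 0
--     return zero_count
-- ===== SOURCE B (Python) =====
-- def get_zeros(coeffs, n):
--     nz = [i for i in range(n) if coeffs[i] != 0]
--     if not nz:
--         return 0
--     best = nz[0]
--     for a, b in zip(nz, nz[1:]):
--         best = max(best, b - a - 1)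
--     return best
-- ===== Notes on version B (the rewrite author's own statement) =====
-- stated objective: alternative
-- what changed: Replaces the running (zero_count, temp_count) state machine by first collecting the indices of nonzero coefficients and then taking the maximum gap between consecutive nonzero indices (plus the leading run), which drops the trailing run structurally.
import Mathlib
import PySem

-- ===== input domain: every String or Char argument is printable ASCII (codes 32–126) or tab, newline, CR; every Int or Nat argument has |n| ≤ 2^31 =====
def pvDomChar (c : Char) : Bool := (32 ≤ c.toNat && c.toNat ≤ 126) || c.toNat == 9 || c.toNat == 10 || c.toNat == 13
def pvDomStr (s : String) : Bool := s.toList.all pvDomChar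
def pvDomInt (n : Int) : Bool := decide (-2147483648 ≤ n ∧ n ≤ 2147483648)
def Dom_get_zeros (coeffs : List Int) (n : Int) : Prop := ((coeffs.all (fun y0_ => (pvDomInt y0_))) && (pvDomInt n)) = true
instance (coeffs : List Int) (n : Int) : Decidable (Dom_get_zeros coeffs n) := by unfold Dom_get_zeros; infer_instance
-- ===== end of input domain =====

-- B replaces A's running (zero_count, temp_count) state machine by a nonzero-index list
-- and a fold over the gaps between consecutive nonzero indices (objective: alternative).


-- ===== PORT A =====
-- literal port of A: fold over range(n) with state (zero_count, temp_count);
-- coeffs[i] is ported as pyGetD (indices are in range on Pre_).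
def get_zeros (coeffs : List Int) (n : Int) : Int :=
  ((PySem.List.pyRange 0 n 1).foldl
    (fun (st : Int × Int) i =>
      if PySem.List.pyGetD coeffs i 0 = 0 then (st.1, st.2 + 1)
      else (if st.2 > st.1 then st.2 else st.1, 0))
    (0, 0)).1

-- ===== PORT B =====
-- literal port of Source B: the nonzero-index list, then a fold over consecutive pairs.
def get_zeros_alt (coeffs : List Int) (n : Int) : Int :=
  let nz := (PySem.List.pyRange 0 n 1).filter (fun i => PySem.List.pyGetD coeffs i 0 != 0)
  match nz with
  | [] => 0
  | h :: t => ((h :: t).zip t).foldl (fun best p => max best (p.2 - p.1 - 1)) h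

-- ===== PRECONDITION & SPEC =====
-- Python A (and B) raises IndexError when n > len(coeffs); Pre_ excludes exactly those inputs.
def Pre_get_zeros (coeffs : List Int) (n : Int) : Prop := n ≤ (coeffs.length : Int)
instance (coeffs : List Int) (n : Int) : Decidable (Pre_get_zeros coeffs n) := by unfold Pre_get_zeros; infer_instance
def pvWitness_get_zeros : List Int × Int := ([1, 0, 0, 2], 4)
def Spec_get_zeros (coeffs : List Int) (n : Int) (out : Int) : Prop := out = get_zeros_alt coeffs n
instance (coeffs : List Int) (n : Int) (out : Int) : Decidable (Spec_get_zeros coeffs n out) := by unfold Spec_get_zeros; infer_instance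

-- ===== CLAIM (what is proved, stated in full; the proofs are below) =====
def Claim_equal_get_zeros : Prop := ∀ (coeffs : List Int) (n : Int), Dom_get_zeros coeffs n → Pre_get_zeros coeffs n → Spec_get_zeros coeffs n (get_zeros coeffs n)

-- ===== LEMMAS AND PROOFS =====

-- gap-fold of B in tail-recursive form: gb best prev rest
def gb : Int → Int → List Int → Int
  | best, _, [] => best
  | best, prev, j :: rest => gb (max best (j - prev - 1)) j rest

theorem zip_fold_eq_gb (t : List Int) (init prev : Int) :
    ((prev :: t).zip t).foldl (fun best p => max best (p.2 - p.1 - 1)) init = gb init prev t := by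
  induction t generalizing init prev with
  | nil => rfl
  | cons b t' ih => simpa [gb] using ih (max init (b - prev - 1)) b

theorem getLastD_cons' (b : Int) (t : List Int) (d : Int) :
    (b :: t).getLastD d = t.getLastD b := by
  cases t <;> simp [List.getLastD]

theorem gb_append (t : List Int) (best prev j : Int) :
    gb best prev (t ++ [j]) = max (gb best prev t) (j - t.getLastD prev - 1) := by
  induction t generalizing best prev with
  | nil => simp [gb, List.getLastD]
  | cons b t' ih =>
    simp only [List.cons_append, gb, getLastD_cons']
    exact ih (max best (b - prev - 1)) b

theorem getLastD_snoc (t : List Int) (a d : Int) : (t ++ [a]).getLastD d = a := by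
  induction t generalizing d with
  | nil => rfl
  | cons b t' ih => rw [List.cons_append, getLastD_cons']; exact ih b

-- value of B on a given nonzero-index list
def bVal : List Int → Int
  | [] => 0
  | h :: t => gb h h t

-- the "temp_count" A carries, expressed from the nonzero-index list and the prefix length
def tVal (m : Int) : List Int → Int
  | [] => m
  | h :: t => m - t.getLastD h - 1

theorem invariant (coeffs : List Int) (m : Nat) :
    ((PySem.List.pyRange 0 (m : Int) 1).foldl
      (fun (st : Int × Int) i =>
        if PySem.List.pyGetD coeffs i 0 = 0 then (st.1, st.2 + 1)
        else (if st.2 > st.1 then st.2 else st.1, 0))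
      (0, 0)) =
    (bVal ((PySem.List.pyRange 0 (m : Int) 1).filter (fun i => PySem.List.pyGetD coeffs i 0 != 0)),
     tVal (m : Int) ((PySem.List.pyRange 0 (m : Int) 1).filter (fun i => PySem.List.pyGetD coeffs i 0 != 0))) := by
  induction m with
  | zero => simp [PySem.List.pyRange_one_eq_nil, bVal, tVal]
  | succ m ih =>
    have hsplit : PySem.List.pyRange 0 ((m + 1 : Nat) : Int) 1
        = PySem.List.pyRange 0 (m : Int) 1 ++ [(m : Int)] := by
      push_cast
      exact PySem.List.pyRange_one_succ_right (by positivity)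
    rw [hsplit, List.foldl_append, List.filter_append, ih]
    by_cases hz : PySem.List.pyGetD coeffs (m : Int) 0 = 0
    · -- coeffs[m] == 0: nz unchanged, temp_count increments
      simp only [List.foldl_cons, List.foldl_nil, List.filter_cons, List.filter_nil, hz,
        bne_self_eq_false, Bool.false_eq_true, if_false, List.append_nil, if_true]
      cases hnz : (PySem.List.pyRange 0 (m : Int) 1).filter
          (fun i => PySem.List.pyGetD coeffs i 0 != 0) with
      | nil => simp only [tVal, bVal, Prod.mk.injEq]; exact ⟨trivial, by push_cast; omega⟩
      | cons h t =>
        simp only [tVal, bVal, Prod.mk.injEq]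
        exact ⟨trivial, by push_cast; omega⟩
    · -- coeffs[m] != 0: nz gains index m, temp_count resets
      simp only [List.foldl_cons, List.foldl_nil, List.filter_cons, List.filter_nil, hz,
        if_false, bne_iff_ne, ne_eq, not_false_eq_true, if_pos]
      cases hnz : (PySem.List.pyRange 0 (m : Int) 1).filter
          (fun i => PySem.List.pyGetD coeffs i 0 != 0) with
      | nil =>
        simp only [List.nil_append, bVal, tVal, gb, List.getLastD, Prod.mk.injEq]
        constructor
        · split <;> omega
        · push_cast; omega
      | cons h t =>
        simp only [List.cons_append, bVal, tVal, gb_append, getLastD_snoc, Prod.mk.injEq]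
        constructor
        · split <;> omega
        · push_cast; omega

theorem ports_agree (coeffs : List Int) (n : Int) :
    get_zeros coeffs n = get_zeros_alt coeffs n := by
  unfold get_zeros get_zeros_alt
  by_cases hn : n ≤ 0
  · rw [PySem.List.pyRange_one_eq_nil hn]; rfl
  · obtain ⟨m, hm⟩ : ∃ m : Nat, n = (m : Int) := ⟨n.toNat, by omega⟩
    subst hm
    rw [invariant]
    cases (PySem.List.pyRange 0 (m : Int) 1).filter
        (fun i => PySem.List.pyGetD coeffs i 0 != 0) with
    | nil => rfl
    | cons h t => simp [bVal, zip_fold_eq_gb]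

-- ===== VERDICT (by name: the statement is the Claim_ definition above) =====
theorem get_zeros_spec : Claim_equal_get_zeros := by
  intro coeffs n _ _
  exact ports_agree coeffs n
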